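-- pv_equiv track=rewrite | github.com/jeeva132/data-structures-and-algorithms | movehyphen.py | MoveHyphen
-- ===== SOURCE A (Python) =====
-- def MoveHyphen(strn):
--     newstr = ''
--     for i in range(len(strn)):
--         if strn[i] == '-':
--             newstr = strn[i] + newstr
--         else:
--             newstr +=strn[i]
--     return newstr
-- ===== SOURCE B (Python) =====
-- def MoveHyphen(strn):
--     return ''.join(sorted(strn, key=lambda c: c != '-'))
-- ===== Notes on version B (the rewrite author's own statement) =====
-- stated objective: simpler
-- what changed: Replaces A's index loop that prepends hyphens and appends other characters to an accumulator string with a single stable sort on the boolean key 'is not a hyphen', which groups hyphens at the front while keeping the other characters in their original order.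
import Mathlib
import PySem

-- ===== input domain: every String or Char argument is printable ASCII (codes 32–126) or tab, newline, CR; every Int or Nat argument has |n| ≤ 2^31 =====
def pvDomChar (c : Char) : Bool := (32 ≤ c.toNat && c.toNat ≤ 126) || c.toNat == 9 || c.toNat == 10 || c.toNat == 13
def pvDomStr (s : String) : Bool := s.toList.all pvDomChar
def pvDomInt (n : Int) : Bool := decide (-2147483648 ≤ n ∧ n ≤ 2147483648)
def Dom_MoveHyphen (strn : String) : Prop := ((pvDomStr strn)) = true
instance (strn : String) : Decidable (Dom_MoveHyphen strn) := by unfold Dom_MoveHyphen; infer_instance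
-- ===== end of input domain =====

-- B replaces A's prepend/append accumulator loop with one stable sort on the key c ≠ '-' (simpler, same result).


-- ===== PORT A =====
-- for i in range(len(strn)): prepend strn[i] if it is '-', else append it
def MoveHyphen (strn : String) : String :=
  let newstr : List Char :=
    (PySem.List.pyRange 0 (PySem.Str.len strn) 1).foldl
      (fun newstr i =>
        let c := PySem.List.pyGetD strn.toList i ' '  -- index always in range here
        if c = '-' then c :: newstr else newstr ++ [c]) []
  String.ofList newstr

-- ===== PORT B =====
-- ''.join(sorted(strn, key=lambda c: c != '-'))
def MoveHyphen_alt (strn : String) : String :=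
  String.ofList (PySem.List.sorted strn.toList (fun c => decide (c ≠ '-')) false)

-- ===== PRECONDITION & SPEC =====
def Spec_MoveHyphen (strn : String) (out : String) : Prop := out = MoveHyphen_alt strn
instance (strn : String) (out : String) : Decidable (Spec_MoveHyphen strn out) := by unfold Spec_MoveHyphen; infer_instance

-- ===== CLAIM (what is proved, stated in full; the proofs are below) =====
def Claim_equal_MoveHyphen : Prop := ∀ (strn : String), Dom_MoveHyphen strn → Spec_MoveHyphen strn (MoveHyphen strn)

-- ===== LEMMAS AND PROOFS =====

-- proof-only abbreviation of the comparator sorted_eq_foldl_insertBy produces for B's key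
def bfun : Char → Char → Bool :=
  fun a b => decide ((fun c => decide (c ≠ '-')) a < (fun c => decide (c ≠ '-')) b)

-- A's loop: hyphens accumulate in front, other characters behind, in order.
theorem foldA (cs : List Char) : ∀ (k : Nat) (r : List Char),
    cs.foldl (fun newstr c => if c = '-' then c :: newstr else newstr ++ [c])
      (List.replicate k '-' ++ r)
    = List.replicate (k + cs.countP (· == '-')) '-' ++ (r ++ cs.filter (fun c => !(c == '-'))) := by
  induction cs with
  | nil => intro k r; simp
  | cons c cs ih =>
    intro k r
    by_cases hc : c = '-'
    · subst hc
      have h1 : ('-' : Char) :: (List.replicate k '-' ++ r) = List.replicate (k + 1) '-' ++ r := by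
        simp [List.replicate_succ]
      have hcnt : k + (('-' :: cs).countP (· == '-')) = (k + 1) + cs.countP (· == '-') := by
        simp [List.countP_cons]; omega
      have hfil : ('-' :: cs).filter (fun c => !(c == '-')) = cs.filter (fun c => !(c == '-')) := by
        simp
      simp only [List.foldl_cons, reduceIte, h1, hcnt, hfil]
      exact ih (k + 1) r
    · have hcnt : k + ((c :: cs).countP (· == '-')) = k + cs.countP (· == '-') := by
        simp [List.countP_cons, hc]
      have hfil : (c :: cs).filter (fun x => !(x == '-')) = c :: cs.filter (fun x => !(x == '-')) := by
        simp [List.filter_cons, hc]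
      simp only [List.foldl_cons, if_neg hc, hcnt, hfil, List.append_assoc]
      have := ih k (r ++ [c])
      simpa [List.append_assoc] using this

-- inserting '-' with B's comparator into (hyphens ++ hyphen-free r) lands right after the hyphens
theorem insertB_hyphen (r : List Char) (hr : ∀ y ∈ r, y ≠ '-') : ∀ (k : Nat),
    PySem.List.insertBy bfun '-' (List.replicate k '-' ++ r) = List.replicate (k + 1) '-' ++ r := by
  intro k
  induction k with
  | zero =>
    cases r with
    | nil => simp [PySem.List.insertBy, bfun]
    | cons y ys =>
      have hy : y ≠ '-' := hr y (by simp)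
      simp [PySem.List.insertBy, bfun, hy]
  | succ k ih =>
    rw [List.replicate_succ, List.cons_append,
      show PySem.List.insertBy bfun '-' ('-' :: (List.replicate k '-' ++ r))
          = '-' :: PySem.List.insertBy bfun '-' (List.replicate k '-' ++ r) from by
        simp [PySem.List.insertBy, bfun],
      ih]
    simp [List.replicate_succ]

-- B's insertion-sort loop keeps the same invariant as A's loop
theorem foldB (cs : List Char) : ∀ (k : Nat) (r : List Char), (∀ y ∈ r, y ≠ '-') →
    cs.foldl (fun acc c => PySem.List.insertBy bfun c acc) (List.replicate k '-' ++ r)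
    = List.replicate (k + cs.countP (· == '-')) '-' ++ (r ++ cs.filter (fun c => !(c == '-'))) := by
  induction cs with
  | nil => intro k r _; simp
  | cons c cs ih =>
    intro k r hr
    by_cases hc : c = '-'
    · subst hc
      have hcnt : k + (('-' :: cs).countP (· == '-')) = (k + 1) + cs.countP (· == '-') := by
        simp [List.countP_cons]; omega
      have hfil : ('-' :: cs).filter (fun c => !(c == '-')) = cs.filter (fun c => !(c == '-')) := by
        simp
      simp only [List.foldl_cons, insertB_hyphen r hr k, hcnt, hfil]
      exact ih (k + 1) r hr
    · have hnb : PySem.List.insertBy bfun c (List.replicate k '-' ++ r)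
          = (List.replicate k '-' ++ r) ++ [c] := by
        apply PySem.List.insertBy_of_forall_not_before
        intro y _
        simp [bfun, hc]
      have hr' : ∀ y ∈ r ++ [c], y ≠ '-' := by
        intro y hy
        rcases List.mem_append.mp hy with h | h
        · exact hr y h
        · simp at h; subst h; exact hc
      have hcnt : k + ((c :: cs).countP (· == '-')) = k + cs.countP (· == '-') := by
        simp [List.countP_cons, hc]
      have hfil : (c :: cs).filter (fun x => !(x == '-')) = c :: cs.filter (fun x => !(x == '-')) := by
        simp [List.filter_cons, hc]
      simp only [List.foldl_cons, hnb, hcnt, hfil, List.append_assoc]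
      have := ih k (r ++ [c]) hr'
      simpa [List.append_assoc] using this

-- ===== VERDICT (by name: the statement is the Claim_ definition above) =====
theorem MoveHyphen_spec : Claim_equal_MoveHyphen := by
  intro strn _
  unfold Spec_MoveHyphen MoveHyphen MoveHyphen_alt
  have hsort : PySem.List.sorted strn.toList (fun c => decide (c ≠ '-')) false
      = strn.toList.foldl (fun acc c => PySem.List.insertBy bfun c acc) [] :=
    PySem.List.sorted_eq_foldl_insertBy strn.toList (fun c => decide (c ≠ '-'))
  simp only [PySem.Str.len_eq, hsort]
  rw [PySem.List.foldl_pyRange_zero_pyGetD' strn.toList ' '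
    (fun newstr c => if c = '-' then c :: newstr else newstr ++ [c]) []]
  have hA := foldA strn.toList 0 []
  have hB := foldB strn.toList 0 [] (by intro y h; simp at h)
  simp only [List.replicate_zero, List.nil_append, Nat.zero_add] at hA hB
  rw [hA, hB]
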